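-- pv_equiv track=rewrite | github.com/ericstubley/advent-of-code | 2016/07/puzzle_2016_07.py | tls_support
-- ===== SOURCE A (Python) =====
-- def tls_support(ip):
--     ret = False
--     paren_stack = []
--     for i, c in enumerate(ip[:-3]):
--         if c == '[':
--             paren_stack.append(c)
--         elif c == ']':
--             paren_stack.pop()
--         elif ip[i:i+4].isalpha() and ip[i] != ip[i+1] and ip[i] == ip[i+3] and ip[i+1] == ip[i+2]:
--             if len(paren_stack) > 0:
--                 ret = False
--                 break
--             else:
--                 ret = True
--     return ret
-- ===== SOURCE B (Python) =====
-- def tls_support(ip):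
--     # closed-form bracket depth via prefix counts; filter ABBA window starts; combine with any()
--     def abba(i):
--         return (ip[i:i+4].isalpha() and ip[i] != ip[i+1]
--                 and ip[i] == ip[i+3] and ip[i+1] == ip[i+2])
--
--     def depth(i):
--         return ip[:i].count('[') - ip[:i].count(']')
--
--     good = [i for i in range(len(ip) - 3) if abba(i)]
--     return any(depth(i) == 0 for i in good) and not any(depth(i) > 0 for i in good)
-- ===== Notes on version B (the rewrite author's own statement) =====
-- stated objective: alternative
-- what changed: Replaces A's single fused scan with a mutable bracket stack and early break by a declarative decomposition: bracket depth at each position is computed in closed form from prefix counts of the two bracket characters, ABBA window starts are collected once, and the result is any(depth==0) and not any(depth>0).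
-- outside the precondition, e.g. on tls_support('[abba]]zzzz'): A returns False, B returns False
import Mathlib
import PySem

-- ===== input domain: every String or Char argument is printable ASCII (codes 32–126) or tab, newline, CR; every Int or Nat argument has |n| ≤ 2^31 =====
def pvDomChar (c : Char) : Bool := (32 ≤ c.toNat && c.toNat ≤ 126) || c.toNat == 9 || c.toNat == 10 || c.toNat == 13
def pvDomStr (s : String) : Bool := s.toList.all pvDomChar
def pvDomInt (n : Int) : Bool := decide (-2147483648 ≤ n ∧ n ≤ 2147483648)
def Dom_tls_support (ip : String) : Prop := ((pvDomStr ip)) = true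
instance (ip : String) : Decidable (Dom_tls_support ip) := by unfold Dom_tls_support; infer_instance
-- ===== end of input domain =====

-- B re-implements the TLS/ABBA check with closed-form bracket depths (prefix counts) and a
-- declarative any() combination instead of A's single fused scan with a mutable stack and break;
-- objective: alternative decomposition, not speed.

-- ===== PORT A =====
-- the fourfold ABBA-window condition 'ip[i:i+4].isalpha() and ip[i] != ip[i+1] and
-- ip[i] == ip[i+3] and ip[i+1] == ip[i+2]' — textually identical in Source A and Source B,
-- so both ports share this one helper
def pvWin (cs : List Char) (i : Int) : Bool :=
  PySem.Chars.strIsalpha (PySem.List.slice cs (some i) (some (i + 4)))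
    && (PySem.List.pyGet? cs i != PySem.List.pyGet? cs (i + 1))
    && (PySem.List.pyGet? cs i == PySem.List.pyGet? cs (i + 3))
    && (PySem.List.pyGet? cs (i + 1) == PySem.List.pyGet? cs (i + 2))

-- A's for-loop over enumerate(ip[:-3]) with state (ret, paren_stack); the stack is pushed/popped
-- at the front (Python appends/pops at the back — only emptiness/length are ever read, so this is
-- the same stack discipline); 'none' is exactly Python's IndexError from paren_stack.pop()
def pvLoopA (cs : List Char) : List (Int × Char) → Bool → List Char → Option Bool
  | [], ret, _ => some ret
  | (i, c) :: rest, ret, stk =>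
    if c = '[' then pvLoopA cs rest ret ('[' :: stk)
    else if c = ']' then
      match stk with
      | [] => none                -- paren_stack.pop() raises IndexError (excluded by Pre_)
      | _ :: stk' => pvLoopA cs rest ret stk'
    else if pvWin cs i then
      if 0 < stk.length then some false    -- ret = False; break
      else pvLoopA cs rest true stk        -- ret = True
    else pvLoopA cs rest ret stk

def tls_support (ip : String) : Bool :=
  (pvLoopA ip.toList
      (PySem.List.enumerate (PySem.List.slice ip.toList none (some (-3))) 0) false []).getD false

-- ===== PORT B =====
-- depth(i) = ip[:i].count('[') - ip[:i].count(']')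
def pvDepthB (cs : List Char) (i : Int) : Int :=
  (PySem.Chars.count (PySem.List.slice cs none (some i)) ['['] : Int)
    - (PySem.Chars.count (PySem.List.slice cs none (some i)) [']'] : Int)

def tls_support_alt (ip : String) : Bool :=
  let cs := ip.toList
  let good := (PySem.List.pyRange 0 (PySem.List.len cs - 3) 1).filter (fun i => pvWin cs i)
  (good.any fun i => pvDepthB cs i == 0) && !(good.any fun i => decide (0 < pvDepthB cs i))

-- ===== PRECONDITION & SPEC =====
-- Pre_ excludes strings whose scanned prefix ip[:-3] contains a closing bracket with no matching
-- earlier opening bracket: there A's paren_stack.pop() underflows (IndexError) — except on the rare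
-- such strings where A breaks on a hypernet ABBA first and returns False, where B returns False too.
def Pre_tls_support (ip : String) : Prop :=
  ∀ j : Nat, j < ip.toList.length - 3 → ip.toList[j]? = some ']' →
    (ip.toList.take j).count ']' < (ip.toList.take j).count '['
instance (ip : String) : Decidable (Pre_tls_support ip) := by unfold Pre_tls_support; infer_instance

def pvWitness_tls_support : String := "abba[mnop]qrst"

def Spec_tls_support (ip : String) (out : Bool) : Prop := out = tls_support_alt ip
instance (ip : String) (out : Bool) : Decidable (Spec_tls_support ip out) := by unfold Spec_tls_support; infer_instance

-- ===== CLAIM (what is proved, stated in full; the proofs are below) =====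
def Claim_equal_tls_support : Prop := ∀ (ip : String), Dom_tls_support ip → Pre_tls_support ip → Spec_tls_support ip (tls_support ip)

-- ===== LEMMAS AND PROOFS =====

-- prefix-count depth, Nat-indexed (proof-side view of pvDepthB)
def pvCnt (cs : List Char) (j : Nat) : Int :=
  ((cs.take j).count '[' : Int) - ((cs.take j).count ']' : Int)

-- "some index j with i ≤ j < n satisfies P"
def pvFromB (n i : Nat) (P : Nat → Bool) : Bool :=
  (List.range n).any fun j => decide (i ≤ j) && P j

def pvHypB (cs : List Char) (i : Nat) : Bool :=
  pvFromB (cs.length - 3) i (fun j => pvWin cs j && decide (0 < pvCnt cs j))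

def pvSupB (cs : List Char) (i : Nat) : Bool :=
  pvFromB (cs.length - 3) i (fun j => pvWin cs j && decide (pvCnt cs j = 0))

lemma pvFromB_ge (n i : Nat) (P : Nat → Bool) (h : n ≤ i) : pvFromB n i P = false := by
  simp only [pvFromB, List.any_eq_false]
  intro j hj
  simp only [List.mem_range] at hj
  simp only [Bool.and_eq_true, decide_eq_true_eq, not_and]
  intro hij
  omega

lemma pvFromB_step (n i : Nat) (P : Nat → Bool) (h : i < n) :
    pvFromB n i P = (P i || pvFromB n (i + 1) P) := by
  rw [Bool.eq_iff_iff]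
  simp only [pvFromB, List.any_eq_true, List.mem_range, Bool.or_eq_true,
    Bool.and_eq_true, decide_eq_true_eq]
  constructor
  · rintro ⟨j, hj, hij, hP⟩
    rcases Nat.eq_or_lt_of_le hij with rfl | hlt
    · exact Or.inl hP
    · exact Or.inr ⟨j, hj, hlt, hP⟩
  · rintro (hP | ⟨j, hj, hij, hP⟩)
    · exact ⟨i, h, le_refl i, hP⟩
    · exact ⟨j, hj, by omega, hP⟩

lemma pvCnt_step (cs : List Char) (i : Nat) (h : i < cs.length) :
    pvCnt cs (i + 1) = pvCnt cs i + (if cs[i] = '[' then 1 else if cs[i] = ']' then -1 else 0) := by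
  simp only [pvCnt, List.take_add_one, List.getElem?_eq_getElem h, Option.toList_some,
    List.count_append, List.count_singleton]
  by_cases h1 : cs[i] = '['
  · have h2 : ¬ cs[i] = ']' := by rw [h1]; decide
    simp [h1, h2]
    ring
  · by_cases h2 : cs[i] = ']'
    · simp [h2]
      ring
    · simp [h1, h2, beq_iff_eq]

lemma pvWin_false_of_not_alpha (cs : List Char) (i : Nat) (h : i < cs.length)
    (ha : PySem.Chars.isalpha cs[i] = false) : pvWin cs (i : Int) = false := by
  have h4 : ((i : Int) + 4) = ((i + 4 : Nat) : Int) := by push_cast; ring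
  rw [pvWin, h4, PySem.List.slice_natCast]
  rw [List.drop_eq_getElem_cons h]
  have hsl : List.take (i + 4 - i) (cs[i] :: List.drop (i + 1) cs)
      = cs[i] :: List.take 3 (List.drop (i + 1) cs) := by
    have : i + 4 - i = 3 + 1 := by omega
    rw [this, List.take_succ_cons]
  rw [hsl]
  simp [PySem.Chars.strIsalpha, ha]

-- the main loop invariant: from position i with the stack length equal to the bracket depth,
-- A's loop computes "False if a hypernet ABBA lies ahead, else ret or a supernet ABBA ahead"
lemma pvLoopA_spec (cs : List Char)
    (hpre : ∀ j : Nat, j < cs.length - 3 → cs[j]? = some ']' →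
      (cs.take j).count ']' < (cs.take j).count '[') :
    ∀ (l : List Char) (i : Nat) (ret : Bool) (stk : List Char),
      l = (cs.take (cs.length - 3)).drop i → (stk.length : Int) = pvCnt cs i →
      pvLoopA cs (PySem.List.enumerate l (i : Int)) ret stk
        = some (if pvHypB cs i then false else ret || pvSupB cs i) := by
  intro l
  induction l with
  | nil =>
    intro i ret stk hl hstk
    have hm : cs.length - 3 ≤ i := by
      have := (List.drop_eq_nil_iff).mp hl.symm
      rw [List.length_take] at this
      omega
    rw [PySem.List.enumerate_nil, pvLoopA, pvHypB, pvSupB,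
      pvFromB_ge _ _ _ hm, pvFromB_ge _ _ _ hm]
    simp
  | cons c rest ih =>
    intro i ret stk hl hstk
    have hil : i < (cs.take (cs.length - 3)).length := by
      by_contra hge
      rw [List.drop_eq_nil_iff.mpr (by omega)] at hl
      exact (List.cons_ne_nil _ _) hl
    have him : i < cs.length - 3 := by rw [List.length_take] at hil; omega
    have hin : i < cs.length := by omega
    rw [List.drop_eq_getElem_cons hil, List.getElem_take] at hl
    have hc : c = cs[i] := by injection hl
    have hrest : rest = (cs.take (cs.length - 3)).drop (i + 1) := by injection hl
    have hcast : (i : Int) + 1 = ((i + 1 : Nat) : Int) := by push_cast; ring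
    rw [PySem.List.enumerate_cons, hcast]
    by_cases hbr1 : c = '['
    · -- push: depth goes up by one
      have halpha : PySem.Chars.isalpha cs[i] = false := by rw [← hc, hbr1]; decide
      have hwin := pvWin_false_of_not_alpha cs i hin halpha
      have hcnt : pvCnt cs (i + 1) = pvCnt cs i + 1 := by
        rw [pvCnt_step cs i hin, ← hc, hbr1]
        simp
      have hH : pvHypB cs i = pvHypB cs (i + 1) := by
        rw [pvHypB, pvFromB_step _ _ _ him]
        simp [pvHypB, hwin]
      have hS : pvSupB cs i = pvSupB cs (i + 1) := by
        rw [pvSupB, pvFromB_step _ _ _ him]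
        simp [pvSupB, hwin]
      simp only [pvLoopA]
      rw [if_pos hbr1,
        ih (i + 1) ret ('[' :: stk) hrest (by simp only [List.length_cons]; push_cast; omega),
        hH, hS]
    · by_cases hbr2 : c = ']'
      · -- pop, justified by Pre_
        have halpha : PySem.Chars.isalpha cs[i] = false := by rw [← hc, hbr2]; decide
        have hwin := pvWin_false_of_not_alpha cs i hin halpha
        have hpos : 0 < pvCnt cs i := by
          have := hpre i him (by rw [List.getElem?_eq_getElem hin, ← hc, hbr2])
          simp only [pvCnt]
          omega
        have hcnt : pvCnt cs (i + 1) = pvCnt cs i - 1 := by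
          rw [pvCnt_step cs i hin, ← hc, hbr2]
          have hne : ¬ (']' : Char) = '[' := by decide
          simp [hne]
          ring
        have hH : pvHypB cs i = pvHypB cs (i + 1) := by
          rw [pvHypB, pvFromB_step _ _ _ him]
          simp [pvHypB, hwin]
        have hS : pvSupB cs i = pvSupB cs (i + 1) := by
          rw [pvSupB, pvFromB_step _ _ _ him]
          simp [pvSupB, hwin]
        simp only [pvLoopA]
        rw [if_neg hbr1, if_pos hbr2]
        cases stk with
        | nil =>
          exfalso
          simp only [List.length_nil, Nat.cast_zero] at hstk
          omega
        | cons x stk' =>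
          dsimp only
          rw [ih (i + 1) ret stk' hrest
            (by simp only [List.length_cons] at hstk; push_cast at hstk ⊢; omega), hH, hS]
      · -- a non-bracket character: the window test runs
        simp only [pvLoopA]
        rw [if_neg hbr1, if_neg hbr2]
        have hcnt : pvCnt cs (i + 1) = pvCnt cs i := by
          rw [hc] at hbr1 hbr2
          rw [pvCnt_step cs i hin]
          simp [hbr1, hbr2]
        by_cases hwin : pvWin cs (i : Int) = true
        · rw [if_pos hwin]
          by_cases hstkpos : 0 < stk.length
          · -- hypernet ABBA: break with False
            have hcpos : 0 < pvCnt cs i := by rw [← hstk]; exact_mod_cast hstkpos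
            have hhyp : pvHypB cs i = true := by
              rw [pvHypB, pvFromB_step _ _ _ him]
              simp [hwin, hcpos]
            rw [if_pos hstkpos, hhyp]
            simp
          · -- supernet ABBA at depth 0: ret = True, keep scanning
            have hzero : pvCnt cs i = 0 := by
              rw [← hstk]
              simp only [Nat.pos_iff_ne_zero, not_not] at hstkpos
              simp [hstkpos]
            have hH : pvHypB cs i = pvHypB cs (i + 1) := by
              rw [pvHypB, pvFromB_step _ _ _ him]
              simp [pvHypB, hzero]
            have hS : pvSupB cs i = true := by
              rw [pvSupB, pvFromB_step _ _ _ him]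
              simp [hwin, hzero]
            rw [if_neg hstkpos, ih (i + 1) true stk hrest (by rw [hstk, hcnt]), hH, hS]
            cases hh : pvHypB cs (i + 1) <;> simp
        · simp only [Bool.not_eq_true] at hwin
          have hH : pvHypB cs i = pvHypB cs (i + 1) := by
            rw [pvHypB, pvFromB_step _ _ _ him]
            simp [pvHypB, hwin]
          have hS : pvSupB cs i = pvSupB cs (i + 1) := by
            rw [pvSupB, pvFromB_step _ _ _ him]
            simp [pvSupB, hwin]
          rw [if_neg (by simp [hwin]), ih (i + 1) ret stk hrest (by rw [hstk, hcnt]), hH, hS]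

-- Chars.count with a single-character needle is List.count (no PySem lemma covers this)
lemma pvCountGo_singleton (c : Char) :
    ∀ (l : List Char) (fuel acc : Nat), l.length ≤ fuel →
      PySem.Chars.count.go [c] fuel l acc = acc + l.count c := by
  intro l
  induction l with
  | nil =>
    intro fuel acc _
    cases fuel <;> simp [PySem.Chars.count.go]
  | cons h t ih =>
    intro fuel acc hfl
    cases fuel with
    | zero => simp at hfl
    | succ f =>
      rw [PySem.Chars.count.go]
      simp only [List.length_cons] at hfl
      by_cases hch : c = h
      · rw [if_pos (by simp [List.isPrefixOf, hch])]
        simp only [List.length_cons, List.length_nil, List.drop_succ_cons, List.drop_zero]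
        rw [ih f (acc + 1) (by omega), List.count_cons]
        simp [hch]
        ring
      · rw [if_neg (by simp [List.isPrefixOf, hch])]
        rw [ih f acc (by omega), List.count_cons]
        simp [beq_iff_eq, Ne.symm hch]

lemma pvCount_singleton (cs : List Char) (c : Char) :
    PySem.Chars.count cs [c] = cs.count c := by
  rw [PySem.Chars.count]
  simp only [List.isEmpty_cons, if_neg Bool.false_ne_true]
  have := pvCountGo_singleton c cs cs.length 0 (le_refl _)
  omega

lemma pvDepthB_eq_pvCnt (cs : List Char) (i : Int) (h : 0 ≤ i) :
    pvDepthB cs i = pvCnt cs i.toNat := by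
  rw [pvDepthB, PySem.List.slice_to cs h, pvCount_singleton, pvCount_singleton, pvCnt]

-- B computes exactly "a supernet ABBA exists and no hypernet ABBA exists"
lemma pvAlt_eq (ip : String) :
    tls_support_alt ip = (pvSupB ip.toList 0 && !pvHypB ip.toList 0) := by
  have hsup : ∀ cs : List Char,
      ((PySem.List.pyRange 0 (PySem.List.len cs - 3) 1).filter (fun i => pvWin cs i)).any
        (fun i => pvDepthB cs i == 0) = pvSupB cs 0 := by
    intro cs
    rw [Bool.eq_iff_iff]
    simp only [List.any_eq_true, List.mem_filter, pvSupB, pvFromB,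
      PySem.List.mem_pyRange_one, PySem.List.len_eq, List.mem_range, Bool.and_eq_true,
      decide_eq_true_eq, beq_iff_eq]
    constructor
    · rintro ⟨i, ⟨⟨h0, hlt⟩, hwin⟩, hd⟩
      refine ⟨i.toNat, by omega, by omega, ?_, ?_⟩
      · rwa [show ((i.toNat : Nat) : Int) = i by omega]
      · rw [← pvDepthB_eq_pvCnt cs i h0]; exact hd
    · rintro ⟨j, hj, _, hwin, hd⟩
      refine ⟨(j : Int), ⟨⟨by omega, by omega⟩, hwin⟩, ?_⟩
      rw [pvDepthB_eq_pvCnt cs j (by omega)]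
      simpa using hd
  have hhyp : ∀ cs : List Char,
      ((PySem.List.pyRange 0 (PySem.List.len cs - 3) 1).filter (fun i => pvWin cs i)).any
        (fun i => decide (0 < pvDepthB cs i)) = pvHypB cs 0 := by
    intro cs
    rw [Bool.eq_iff_iff]
    simp only [List.any_eq_true, List.mem_filter, pvHypB, pvFromB,
      PySem.List.mem_pyRange_one, PySem.List.len_eq, List.mem_range, Bool.and_eq_true,
      decide_eq_true_eq]
    constructor
    · rintro ⟨i, ⟨⟨h0, hlt⟩, hwin⟩, hd⟩
      refine ⟨i.toNat, by omega, by omega, ?_, ?_⟩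
      · rwa [show ((i.toNat : Nat) : Int) = i by omega]
      · rw [← pvDepthB_eq_pvCnt cs i h0]; exact hd
    · rintro ⟨j, hj, _, hwin, hd⟩
      refine ⟨(j : Int), ⟨⟨by omega, by omega⟩, hwin⟩, ?_⟩
      rw [pvDepthB_eq_pvCnt cs j (by omega)]
      simpa using hd
  rw [tls_support_alt, hsup, hhyp]

-- ===== VERDICT (by name: the statement is the Claim_ definition above) =====
theorem tls_support_spec : Claim_equal_tls_support := by
  intro ip _hdom hpre
  unfold Spec_tls_support
  rw [pvAlt_eq]
  have hslice : PySem.List.slice ip.toList none (some (-3))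
      = ip.toList.take (ip.toList.length - 3) :=
    PySem.List.slice_to_neg_ofNat ip.toList 3 (by omega)
  have hmain := pvLoopA_spec ip.toList hpre (ip.toList.take (ip.toList.length - 3)) 0 false []
    (by simp) (by simp [pvCnt])
  simp only [Nat.cast_zero] at hmain
  rw [tls_support, hslice, hmain]
  cases hh : pvHypB ip.toList 0 <;> simp
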